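-- pv_equiv track=rewrite | github.com/Pan-tech15/analisis-sentimen | backend/app/services/lexicon_nb.py | compute_class_word_freq
-- ===== SOURCE A (Python) =====
-- def compute_class_word_freq(texts, labels):
--     class_word_counts = {}
--     class_doc_counts = {}
--     for text, label in zip(texts, labels):
--         words = text.split()
--         class_doc_counts[label] = class_doc_counts.get(label, 0) + 1
--         if label not in class_word_counts:
--             class_word_counts[label] = {}
--         for w in words:
--             class_word_counts[label][w] = class_word_counts[label].get(w, 0) + 1
--     return class_word_counts, class_doc_counts
-- ===== SOURCE B (Python) =====
-- def compute_class_word_freq(texts, labels):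
--     # First pass: group texts by label (insertion order of first occurrence).
--     groups = {}
--     for text, label in zip(texts, labels):
--         groups.setdefault(label, []).append(text)
--     # Second pass: per-label document counts and word counts from the groups.
--     class_doc_counts = {label: len(group) for label, group in groups.items()}
--     class_word_counts = {}
--     for label, group in groups.items():
--         counts = {}
--         for text in group:
--             for w in text.split():
--                 counts[w] = counts.get(w, 0) + 1
--         class_word_counts[label] = counts
--     return class_word_counts, class_doc_counts
-- ===== Notes on version B (the rewrite author's own statement) =====
-- stated objective: alternative
-- what changed: B replaces A's single interleaved pass that updates nested per-label dicts with a two-phase decomposition: first group the texts by label into a grouping dict, then derive the document counts by a dict comprehension over the groups and build each label's word-count dict in one dedicated loop over that label's texts.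
import Mathlib
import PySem

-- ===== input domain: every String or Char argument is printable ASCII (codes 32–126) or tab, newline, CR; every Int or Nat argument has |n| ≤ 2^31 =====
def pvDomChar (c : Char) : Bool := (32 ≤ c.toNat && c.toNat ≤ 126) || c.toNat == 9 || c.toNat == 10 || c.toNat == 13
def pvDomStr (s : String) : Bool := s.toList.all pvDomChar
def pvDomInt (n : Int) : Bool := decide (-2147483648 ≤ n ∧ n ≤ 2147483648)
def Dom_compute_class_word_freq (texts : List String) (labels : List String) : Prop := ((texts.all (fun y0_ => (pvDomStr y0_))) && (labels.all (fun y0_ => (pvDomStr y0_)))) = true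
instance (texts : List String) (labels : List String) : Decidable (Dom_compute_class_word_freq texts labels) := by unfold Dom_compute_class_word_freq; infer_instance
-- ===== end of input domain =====

-- B replaces A's single interleaved pass over (text, label) pairs updating nested dicts by a
-- two-phase decomposition: group texts by label first, then count documents and words per group.
-- Same asymptotic cost; equivalence of return values is proved below.

-- ===== PORT A =====
-- one iteration of A's loop body over state (class_word_counts, class_doc_counts)
def pvAStep (st : PySem.Dict String (PySem.Dict String Int) × PySem.Dict String Int)
    (p : String × String) :
    PySem.Dict String (PySem.Dict String Int) × PySem.Dict String Int :=
  let words := PySem.Str.split₀ p.1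
  let cdc := st.2.insert p.2 (st.2.getD p.2 0 + 1)
  let cwc := if st.1.contains p.2 then st.1 else st.1.insert p.2 PySem.Dict.empty
  let cwc := words.foldl
    (fun d w => d.insert p.2 ((d.getD p.2 PySem.Dict.empty).insert w
      ((d.getD p.2 PySem.Dict.empty).getD w 0 + 1))) cwc
  (cwc, cdc)

def compute_class_word_freq (texts : List String) (labels : List String) :
    (List (String × List (String × Int))) × (List (String × Int)) :=
  let st := (texts.zip labels).foldl pvAStep (PySem.Dict.empty, PySem.Dict.empty)
  (st.1.items.map (fun q => (q.1, q.2.items)), st.2.items)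

-- ===== PORT B =====
-- word-count dict for one label's group of texts (B's inner double loop)
def pvCountWords (group : List String) : PySem.Dict String Int :=
  group.foldl (fun c t =>
      (PySem.Str.split₀ t).foldl (fun c w => c.insert w (c.getD w 0 + 1)) c)
    PySem.Dict.empty

def compute_class_word_freq_alt (texts : List String) (labels : List String) :
    (List (String × List (String × Int))) × (List (String × Int)) :=
  let groups := (texts.zip labels).foldl
    (fun (g : PySem.Dict String (List String)) p => g.modify p.2 [] (· ++ [p.1]))
    PySem.Dict.empty
  let cdc := groups.items.foldl
    (fun (d : PySem.Dict String Int) q => d.insert q.1 (PySem.List.len q.2))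
    PySem.Dict.empty
  let cwc := groups.items.foldl
    (fun (d : PySem.Dict String (PySem.Dict String Int)) q => d.insert q.1 (pvCountWords q.2))
    PySem.Dict.empty
  (cwc.items.map (fun q => (q.1, q.2.items)), cdc.items)

-- ===== PRECONDITION & SPEC =====
def Spec_compute_class_word_freq (texts : List String) (labels : List String) (out : (List (String × List (String × Int))) × (List (String × Int))) : Prop := out = compute_class_word_freq_alt texts labels
instance (texts : List String) (labels : List String) (out : (List (String × List (String × Int))) × (List (String × Int))) : Decidable (Spec_compute_class_word_freq texts labels out) := by unfold Spec_compute_class_word_freq; infer_instance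

-- ===== CLAIM (what is proved, stated in full; the proofs are below) =====
def Claim_equal_compute_class_word_freq : Prop := ∀ (texts : List String) (labels : List String), Dom_compute_class_word_freq texts labels → Spec_compute_class_word_freq texts labels (compute_class_word_freq texts labels)

-- ===== LEMMAS AND PROOFS =====

-- A's inner word loop at key k: the entry at k accumulates the word counter, other entries unchanged
theorem pvInner_getD (ws : List String) (k c : String)
    (d : PySem.Dict String (PySem.Dict String Int)) (hk : d.contains k = true) :
    (ws.foldl (fun d w => d.insert k ((d.getD k PySem.Dict.empty).insert w
        ((d.getD k PySem.Dict.empty).getD w 0 + 1))) d).getD c PySem.Dict.empty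
    = if c = k then
        ws.foldl (fun c w => c.insert w (c.getD w 0 + 1)) (d.getD k PySem.Dict.empty)
      else d.getD c PySem.Dict.empty := by
  induction ws generalizing d with
  | nil => by_cases h : c = k <;> simp [h]
  | cons w ws ih =>
    simp only [List.foldl_cons]
    rw [ih _ (by simp)]
    by_cases h : c = k
    · subst h
      simp [PySem.Dict.getD_insert_self]
    · simp [h, PySem.Dict.getD_insert_of_ne _ _ _ h]

theorem pvInner_keys (ws : List String) (k : String)
    (d : PySem.Dict String (PySem.Dict String Int)) (hk : d.contains k = true) :
    (ws.foldl (fun d w => d.insert k ((d.getD k PySem.Dict.empty).insert w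
        ((d.getD k PySem.Dict.empty).getD w 0 + 1))) d).keys = d.keys := by
  induction ws generalizing d with
  | nil => rfl
  | cons w ws ih =>
    simp only [List.foldl_cons]
    rw [ih _ (by simp), PySem.Dict.keys_insert_of_contains _ _ hk]


-- the two independent components of A's loop body
def pvStepW (d : PySem.Dict String (PySem.Dict String Int)) (p : String × String) :
    PySem.Dict String (PySem.Dict String Int) :=
  let words := PySem.Str.split₀ p.1
  let cwc := if d.contains p.2 then d else d.insert p.2 PySem.Dict.empty
  words.foldl
    (fun d w => d.insert p.2 ((d.getD p.2 PySem.Dict.empty).insert w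
      ((d.getD p.2 PySem.Dict.empty).getD w 0 + 1))) cwc

def pvStepC (d : PySem.Dict String Int) (p : String × String) : PySem.Dict String Int :=
  d.insert p.2 (d.getD p.2 0 + 1)

-- all words of the texts labelled c, in order
def pvWordsOf (c : String) (pairs : List (String × String)) : List String :=
  (pairs.filter (fun p => p.2 == c)).flatMap (fun p => PySem.Str.split₀ p.1)

theorem pvAStep_eq (st : PySem.Dict String (PySem.Dict String Int) × PySem.Dict String Int)
    (p : String × String) : pvAStep st p = (pvStepW st.1 p, pvStepC st.2 p) := rfl

theorem pvStepW_getD (d : PySem.Dict String (PySem.Dict String Int)) (p : String × String)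
    (c : String) :
    (pvStepW d p).getD c PySem.Dict.empty
    = if p.2 == c then
        (PySem.Str.split₀ p.1).foldl (fun cd w => cd.insert w (cd.getD w 0 + 1))
          (d.getD p.2 PySem.Dict.empty)
      else d.getD c PySem.Dict.empty := by
  have hc0 : ∀ c', (if d.contains p.2 then d else d.insert p.2 PySem.Dict.empty).getD c'
      PySem.Dict.empty = d.getD c' PySem.Dict.empty := by
    intro c'
    split_ifs with h
    · rfl
    · by_cases hc' : c' = p.2
      · subst hc'
        rw [PySem.Dict.getD_insert_self, PySem.Dict.getD_of_not_contains _ _ (by simpa using h)]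
      · rw [PySem.Dict.getD_insert_of_ne _ _ _ hc']
  have hcont : (if d.contains p.2 then d else d.insert p.2 PySem.Dict.empty).contains p.2 = true := by
    split_ifs with h
    · exact h
    · exact PySem.Dict.contains_insert_self _ _ _
  unfold pvStepW
  simp only []
  rw [pvInner_getD _ _ _ _ hcont, hc0, hc0]
  by_cases h : p.2 = c <;> simp [h, beq_iff_eq]
  · intro h'; exact absurd h'.symm h

theorem pvStepW_keys (d : PySem.Dict String (PySem.Dict String Int)) (p : String × String) :
    (pvStepW d p).keys = PySem.Set.add d.keys p.2 := by
  have hcont : (if d.contains p.2 then d else d.insert p.2 PySem.Dict.empty).contains p.2 = true := by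
    split_ifs with h
    · exact h
    · exact PySem.Dict.contains_insert_self _ _ _
  unfold pvStepW
  simp only []
  rw [pvInner_keys _ _ _ hcont]
  split_ifs with h
  · rw [PySem.Set.add_of_mem ((PySem.Dict.contains_iff_mem_keys _ _).mp h)]
  · rw [PySem.Dict.keys_insert_of_not_contains _ _ (by simpa using h),
      PySem.Set.add_of_not_mem (fun hm => h ((PySem.Dict.contains_iff_mem_keys _ _).mpr hm))]

theorem pvFoldW_getD (pairs : List (String × String))
    (d : PySem.Dict String (PySem.Dict String Int)) (c : String) :
    (pairs.foldl pvStepW d).getD c PySem.Dict.empty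
    = (pvWordsOf c pairs).foldl (fun cd w => cd.insert w (cd.getD w 0 + 1))
        (d.getD c PySem.Dict.empty) := by
  induction pairs generalizing d with
  | nil => simp [pvWordsOf]
  | cons p rest ih =>
    simp only [List.foldl_cons]
    rw [ih, pvStepW_getD]
    by_cases h : p.2 = c
    · subst h
      simp [pvWordsOf, List.foldl_append]
    · simp [pvWordsOf, h, beq_iff_eq]

theorem pvFoldW_keys (pairs : List (String × String))
    (d : PySem.Dict String (PySem.Dict String Int)) :
    (pairs.foldl pvStepW d).keys = PySem.Set.update d.keys (pairs.map (fun p => p.2)) := by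
  induction pairs generalizing d with
  | nil => simp [PySem.Set.update_nil]
  | cons p rest ih =>
    simp only [List.foldl_cons, List.map_cons]
    rw [ih, pvStepW_keys, PySem.Set.update_cons]

-- B's grouping dict: entry at c is the list of texts labelled c
theorem pvGroups_getD (pairs : List (String × String)) (c : String) :
    (pairs.foldl (fun (g : PySem.Dict String (List String)) p => g.modify p.2 [] (· ++ [p.1]))
        PySem.Dict.empty).getD c []
    = (pairs.filter (fun p => p.2 == c)).map (fun p => p.1) := by
  have h : pairs.foldl (fun (g : PySem.Dict String (List String)) p => g.modify p.2 [] (· ++ [p.1]))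
        PySem.Dict.empty
      = ((pairs.map (fun p => (p.2, p.1))).foldl
          (fun (g : PySem.Dict String (List String)) p => g.modify p.1 [] (· ++ [p.2]))
          PySem.Dict.empty) := by
    rw [List.foldl_map]
  rw [h, PySem.Dict.getD_foldl_modify_append]
  simp [List.filter_map, List.map_map, Function.comp_def]

theorem pvGroups_keys (pairs : List (String × String)) :
    (pairs.foldl (fun (g : PySem.Dict String (List String)) p => g.modify p.2 [] (· ++ [p.1]))
        PySem.Dict.empty).keys
    = PySem.Set.ofList (pairs.map (fun p => p.2)) := by
  rw [PySem.Dict.keys_foldl_modify_key (key := fun p : String × String => p.2)]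
  simp [PySem.Set.update_nil_left]

theorem pvGroups_nodup (pairs : List (String × String)) :
    (pairs.foldl (fun (g : PySem.Dict String (List String)) p => g.modify p.2 [] (· ++ [p.1]))
        PySem.Dict.empty).keys.Nodup := by
  rw [pvGroups_keys]; exact PySem.Set.nodup_ofList _

-- a fold of inserts at the (distinct, fresh) keys of groups.items just appends
theorem pvItems_map {ν : Type} (l : List (String × List String)) (v : List String → ν)
    (hn : (l.map (fun q => q.1)).Nodup) :
    (l.foldl (fun (d : PySem.Dict String ν) q => d.insert q.1 (v q.2)) PySem.Dict.empty).items
    = l.map (fun q => (q.1, v q.2)) := by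
  rw [PySem.Dict.items_foldl_insert_fresh (k := fun q => q.1) (v := fun q => v q.2)
      (d := PySem.Dict.empty) l (fun a _ => PySem.Dict.contains_empty _) hn]
  simp [PySem.Dict.empty]

-- B's word counter over a group is the flat word-list counter
theorem pvCountWords_eq (g : List String) :
    pvCountWords g = (g.flatMap (fun t => PySem.Str.split₀ t)).foldl
      (fun cd w => cd.insert w (cd.getD w 0 + 1)) PySem.Dict.empty := by
  rw [pvCountWords, List.foldl_flatMap]

theorem pv_main (texts labels : List String) :
    compute_class_word_freq texts labels = compute_class_word_freq_alt texts labels := by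
  unfold compute_class_word_freq compute_class_word_freq_alt
  simp only []
  set pairs := texts.zip labels with hp
  set labs := pairs.map (fun p => p.2) with hl
  set groups := pairs.foldl
    (fun (g : PySem.Dict String (List String)) p => g.modify p.2 [] (· ++ [p.1]))
    PySem.Dict.empty with hg
  have hgn : groups.keys.Nodup := pvGroups_nodup pairs
  have hgitems : groups.items = groups.keys.map (fun k => (k, groups.getD k [])) :=
    PySem.Dict.items_eq_map_keys groups hgn []
  have hinodup : (groups.items.map (fun q => q.1)).Nodup := by
    simpa only [PySem.Dict.keys] using hgn
  -- split A's fold into its two components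
  have hsplit : pairs.foldl pvAStep (PySem.Dict.empty, PySem.Dict.empty)
      = (pairs.foldl pvStepW PySem.Dict.empty, pairs.foldl pvStepC PySem.Dict.empty) := by
    have : pvAStep = fun st p => (pvStepW st.1 p, pvStepC st.2 p) := by
      funext st p; exact pvAStep_eq st p
    rw [this, PySem.List.foldl_prod_mk]
  rw [hsplit]
  refine Prod.ext ?_ ?_
  · -- word-count dicts
    show (pairs.foldl pvStepW PySem.Dict.empty).items.map (fun q => (q.1, q.2.items)) = _
    have hA : (pairs.foldl pvStepW PySem.Dict.empty).items
        = (PySem.Set.ofList labs).map (fun k =>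
            (k, (pvWordsOf k pairs).foldl
              (fun cd w => cd.insert w (cd.getD w 0 + 1)) PySem.Dict.empty)) := by
      have hkeys : (pairs.foldl pvStepW PySem.Dict.empty).keys = PySem.Set.ofList labs := by
        rw [pvFoldW_keys]
        simp [PySem.Set.update_nil_left, hl]
      have hnd : (pairs.foldl pvStepW PySem.Dict.empty).keys.Nodup := by
        rw [hkeys]; exact PySem.Set.nodup_ofList _
      rw [PySem.Dict.items_eq_map_keys _ hnd PySem.Dict.empty, hkeys]
      refine List.map_congr_left (fun k _ => ?_)
      rw [pvFoldW_getD]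
      simp
    have hB : (groups.items.foldl
          (fun (d : PySem.Dict String (PySem.Dict String Int)) q =>
            d.insert q.1 (pvCountWords q.2)) PySem.Dict.empty).items
        = (PySem.Set.ofList labs).map (fun k =>
            (k, (pvWordsOf k pairs).foldl
              (fun cd w => cd.insert w (cd.getD w 0 + 1)) PySem.Dict.empty)) := by
      rw [pvItems_map groups.items pvCountWords hinodup, hgitems, List.map_map,
        ← pvGroups_keys pairs, ← hg]
      refine List.map_congr_left (fun k _ => ?_)
      simp only [Function.comp_def]
      rw [pvCountWords_eq, pvGroups_getD]
      congr 1
      simp [pvWordsOf, List.flatMap_map]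
    rw [hA, hB]
  · -- doc-count dicts
    show (pairs.foldl pvStepC PySem.Dict.empty).items = _
    have hA : pairs.foldl pvStepC PySem.Dict.empty
        = labs.foldl (fun (d : PySem.Dict String Int) x => d.insert x (d.getD x 0 + 1))
            PySem.Dict.empty := by
      rw [hl, List.foldl_map]; rfl
    rw [hA, PySem.Dict.foldl_insert_getD_add_one_eq_counter, PySem.Dict.items_counter,
      pvItems_map groups.items (fun g => PySem.List.len g) hinodup, hgitems, List.map_map,
      ← pvGroups_keys pairs, ← hg]
    refine List.map_congr_left (fun k _ => ?_)
    simp only [Function.comp_def]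
    rw [pvGroups_getD]
    simp [PySem.List.len_eq, hl, List.count_eq_countP, ← List.countP_eq_length_filter,
      List.countP_map, Function.comp_def]


-- ===== VERDICT (by name: the statement is the Claim_ definition above) =====
theorem compute_class_word_freq_spec : Claim_equal_compute_class_word_freq := by
  intro texts labels _
  unfold Spec_compute_class_word_freq
  exact pv_main texts labels
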